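-- pv_equiv track=rewrite | github.com/bpankask/ERCompletionReasoningLSTM | main.py | custom
-- ===== SOURCE A (Python) =====
-- def custom(conceptSpace, roleSpace, s1, s2):
--     if len(s1) < len(s2): return custom(conceptSpace, roleSpace, s2, s1)
--
--     dist = 0
--
--     for k in range(len(s1)):
--         string1 = s1[k]
--         string2 = s2[k] if len(s2) > k else ""
--         if string2 == "":
--             dist = dist + int(
--                 ''.join(x for x in string1 if x.isdigit()))  # + (conceptSpace if string1[0] == 'C' else roleSpace)
--         else:
--             if (string1[0] == 'C' and string2[0] == 'R') or (string1[0] == 'R' and string2[0] == 'C'):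
--                 dist = dist + abs(
--                     int(''.join(x for x in string1 if x.isdigit())) + int(''.join(x for x in string2 if x.isdigit())))
--             else:
--                 dist = dist + abs(
--                     int(''.join(x for x in string1 if x.isdigit())) - int(''.join(x for x in string2 if x.isdigit())))
--
--     return dist
-- ===== SOURCE B (Python) =====
-- def custom(conceptSpace, roleSpace, s1, s2):
--     longer, shorter = (s1, s2) if len(s1) >= len(s2) else (s2, s1)
--
--     def num(s):
--         return int(''.join(c for c in s if c.isdigit()))
--
--     def clash(a, b):
--         return (a[0] == 'C' and b[0] == 'R') or (a[0] == 'R' and b[0] == 'C')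
--
--     # All extracted numbers are non-negative, so |a+b| = a+b and |a-b| = a+b-2*min(a,b):
--     # the distance is the grand total of all numbers minus twice the overlap of
--     # aligned same-kind pairs.
--     total = sum(num(t) for t in longer) + sum(num(t) for t in shorter if t != "")
--     overlap = sum(min(num(a), num(b))
--                   for a, b in zip(longer, shorter)
--                   if b != "" and not clash(a, b))
--     return total - 2 * overlap
-- ===== Notes on version B (the rewrite author's own statement) =====
-- stated objective: alternative
-- what changed: Replaces A's per-pair branch arithmetic (abs of sum or difference chosen by first-letter kinds) with a global-sum formulation: since every extracted number is non-negative, dist = sum of all numbers (skipping empty partner slots) minus twice the sum of min(num(a),num(b)) over aligned non-clashing pairs, using |a-b| = a+b-2*min(a,b).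
import Mathlib
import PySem

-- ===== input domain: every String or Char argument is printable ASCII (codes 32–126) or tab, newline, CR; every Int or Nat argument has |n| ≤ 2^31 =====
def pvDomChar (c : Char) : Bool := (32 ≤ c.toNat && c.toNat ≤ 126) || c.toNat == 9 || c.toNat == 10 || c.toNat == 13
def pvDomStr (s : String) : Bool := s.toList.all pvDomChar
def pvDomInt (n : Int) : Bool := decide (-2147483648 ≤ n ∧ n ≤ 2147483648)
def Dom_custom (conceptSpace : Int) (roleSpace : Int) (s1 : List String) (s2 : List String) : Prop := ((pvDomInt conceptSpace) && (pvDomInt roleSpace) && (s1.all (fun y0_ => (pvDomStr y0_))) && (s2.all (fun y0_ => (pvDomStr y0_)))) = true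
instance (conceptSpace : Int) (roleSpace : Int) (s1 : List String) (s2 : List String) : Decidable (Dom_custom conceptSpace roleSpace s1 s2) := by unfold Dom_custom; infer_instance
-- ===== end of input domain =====

-- B replaces A's per-pair branch arithmetic (abs of sum/difference chosen by first-letter kinds)
-- by a global-sum formulation: all extracted numbers are non-negative, so
-- dist = (sum of all numbers, skipping empty partner slots) - 2 * (sum of min over aligned non-clashing pairs).

-- int(''.join(x for x in s if x.isdigit())); total form — Pre_custom guarantees a digit is present
def pvDigits (s : String) : String := String.ofList (s.toList.filter Char.isDigit)
def pvNum (s : String) : Int := (PySem.Int.ofStr? (pvDigits s)).getD 0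
-- s[0] == c  (Python IndexError on "" → PySem.Str.pyGet? = none; Pre_custom excludes that case)
def pvFirstIs (s : String) (c : Char) : Bool := PySem.Str.pyGet? s 0 == some c
-- (a[0]=='C' and b[0]=='R') or (a[0]=='R' and b[0]=='C')
def pvClash (a b : String) : Bool :=
  (pvFirstIs a 'C' && pvFirstIs b 'R') || (pvFirstIs a 'R' && pvFirstIs b 'C')

-- ===== PORT A =====
def custom (conceptSpace : Int) (roleSpace : Int) (s1 : List String) (s2 : List String) : Int :=
  if s1.length < s2.length then custom conceptSpace roleSpace s2 s1
  else
    (List.range s1.length).foldl (fun dist k =>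
      let string1 := s1.getD k ""            -- s1[k], k < len(s1) by construction
      let string2 := if s2.length > k then s2.getD k "" else ""
      if string2 = "" then
        dist + pvNum string1
      else if pvClash string1 string2 then
        dist + |pvNum string1 + pvNum string2|
      else
        dist + |pvNum string1 - pvNum string2|) 0
termination_by s2.length

-- ===== PORT B =====
def custom_alt (conceptSpace : Int) (roleSpace : Int) (s1 : List String) (s2 : List String) : Int :=
  let p := if s1.length ≥ s2.length then (s1, s2) else (s2, s1)
  let total := (p.1.map pvNum).sum + ((p.2.filter (fun t => t ≠ "")).map pvNum).sum
  let overlap := (((p.1.zip p.2).filter (fun t => t.2 ≠ "" ∧ pvClash t.1 t.2 = false)).map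
      (fun t => min (pvNum t.1) (pvNum t.2))).sum
  total - 2 * overlap

-- ===== PRECONDITION & SPEC =====
def pvHasDigit (s : String) : Bool := s.toList.any Char.isDigit
-- Pre_custom: exactly the inputs on which the Python A returns (no ValueError from int('') —
-- every string whose partner slot is empty/absent must contain a digit — and no IndexError from
-- s[0] — aligned nonempty pairs must have both strings nonempty and digit-bearing).
def Pre_custom (conceptSpace : Int) (roleSpace : Int) (s1 : List String) (s2 : List String) : Prop :=
  (∀ t ∈ (if s1.length < s2.length then s2 else s1).zip (if s1.length < s2.length then s1 else s2),
      (t.2 = "" → pvHasDigit t.1 = true) ∧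
      (t.2 ≠ "" → t.1 ≠ "" ∧ pvHasDigit t.1 = true ∧ pvHasDigit t.2 = true)) ∧
  (∀ s ∈ (if s1.length < s2.length then s2 else s1).drop
            (if s1.length < s2.length then s1 else s2).length, pvHasDigit s = true)
instance (conceptSpace : Int) (roleSpace : Int) (s1 : List String) (s2 : List String) : Decidable (Pre_custom conceptSpace roleSpace s1 s2) := by unfold Pre_custom; infer_instance
def pvWitness_custom : Int × Int × List String × List String := (1, 2, ["C1", "R2", "C7"], ["C3", ""])
def Spec_custom (conceptSpace : Int) (roleSpace : Int) (s1 : List String) (s2 : List String) (out : Int) : Prop := out = custom_alt conceptSpace roleSpace s1 s2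
instance (conceptSpace : Int) (roleSpace : Int) (s1 : List String) (s2 : List String) (out : Int) : Decidable (Spec_custom conceptSpace roleSpace s1 s2 out) := by unfold Spec_custom; infer_instance

-- ===== CLAIM (what is proved, stated in full; the proofs are below) =====
def Claim_equal_custom : Prop := ∀ (conceptSpace : Int) (roleSpace : Int) (s1 : List String) (s2 : List String), Dom_custom conceptSpace roleSpace s1 s2 → Pre_custom conceptSpace roleSpace s1 s2 → Spec_custom conceptSpace roleSpace s1 s2 (custom conceptSpace roleSpace s1 s2)

-- ===== LEMMAS AND PROOFS =====

-- a digit character is one of '0'..'9'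
lemma digit_cases (c : Char) (hd : c.isDigit) :
    c = '0' ∨ c = '1' ∨ c = '2' ∨ c = '3' ∨ c = '4' ∨ c = '5' ∨ c = '6' ∨ c = '7' ∨ c = '8' ∨ c = '9' := by
  simp only [Char.isDigit, decide_eq_true_eq, Bool.and_eq_true, ge_iff_le] at hd
  obtain ⟨a, b⟩ := hd
  rw [UInt32.le_iff_toNat_le] at a b
  have hlo : 48 ≤ c.val.toNat := a
  have hhi : c.val.toNat ≤ 57 := b
  have hval : ∀ n : ℕ, c.val.toNat = n → ∀ d : Char, d.val.toNat = n → c = d := by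
    intro n hn d hdn
    exact Char.ext (UInt32.toNat_inj.mp (hn.trans hdn.symm))
  interval_cases hn : c.val.toNat
  · exact Or.inl (hval _ rfl '0' rfl)
  · exact Or.inr (Or.inl (hval _ rfl '1' rfl))
  · exact Or.inr (Or.inr (Or.inl (hval _ rfl '2' rfl)))
  · exact Or.inr (Or.inr (Or.inr (Or.inl (hval _ rfl '3' rfl))))
  · exact Or.inr (Or.inr (Or.inr (Or.inr (Or.inl (hval _ rfl '4' rfl)))))
  · exact Or.inr (Or.inr (Or.inr (Or.inr (Or.inr (Or.inl (hval _ rfl '5' rfl))))))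
  · exact Or.inr (Or.inr (Or.inr (Or.inr (Or.inr (Or.inr (Or.inl (hval _ rfl '6' rfl)))))))
  · exact Or.inr (Or.inr (Or.inr (Or.inr (Or.inr (Or.inr (Or.inr (Or.inl (hval _ rfl '7' rfl))))))))
  · exact Or.inr (Or.inr (Or.inr (Or.inr (Or.inr (Or.inr (Or.inr (Or.inr (Or.inl (hval _ rfl '8' rfl)))))))))
  · exact Or.inr (Or.inr (Or.inr (Or.inr (Or.inr (Or.inr (Or.inr (Or.inr (Or.inr (hval _ rfl '9' rfl)))))))))

lemma pv_optNat (o : Option Nat) :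
    0 ≤ (Option.map (fun n => n) (do let a ← o; pure ((a : Int)))).getD 0 := by
  cases o <;> simp

-- int() of a digit-only character list is non-negative (the '-'/'+' branches are unreachable)
lemma pv_ofChars_digits_nonneg (l : List Char) (h : ∀ c ∈ l, c.isDigit) :
    0 ≤ (PySem.Int.ofChars? l).getD 0 := by
  have hds : ∀ (m : List Char), (∀ c ∈ m, c.isDigit) → List.dropWhile PySem.Int.isIntSpace m = m := by
    intro m hm
    cases m with
    | nil => rfl
    | cons c t =>
      rw [List.dropWhile_cons_of_neg]
      have hd := hm c (by simp)
      intro hsp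
      simp [PySem.Int.isIntSpace] at hsp
      rcases hsp with ((((h'|h')|h')|h')|h')|h' <;> rw [h'] at hd <;> simp [Char.isDigit] at hd
  unfold PySem.Int.ofChars?
  rw [hds l h, hds l.reverse (by simpa using fun c hc => h c hc), List.reverse_reverse]
  cases l with
  | nil => exact pv_optNat _
  | cons c t =>
    rcases digit_cases c (h c (by simp)) with h'|h'|h'|h'|h'|h'|h'|h'|h'|h' <;> subst h' <;>
      exact pv_optNat _

-- every extracted number is non-negative
lemma pvNum_nonneg (s : String) : 0 ≤ pvNum s := by
  unfold pvNum pvDigits PySem.Int.ofStr?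
  rw [String.toList_ofList]
  exact pv_ofChars_digits_nonneg _ (fun c hc => (List.mem_filter.mp hc).2)

def pvStep (dist : Int) (t1 t2 : String) : Int :=
  if t2 = "" then dist + pvNum t1
  else if pvClash t1 t2 then
    dist + |pvNum t1 + pvNum t2|
  else
    dist + |pvNum t1 - pvNum t2|

-- A's index loop, in list-recursion form
lemma pv_loopA_shift (x : String) (a b : List String) (acc : Int) :
    (List.range (x :: a).length).foldl (fun dist k => pvStep dist ((x :: a).getD k "")
        (if b.length > k then b.getD k "" else "")) acc
  = (List.range a.length).foldl (fun dist k => pvStep dist (a.getD k "")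
        (if b.tail.length > k then b.tail.getD k "" else ""))
      (pvStep acc x (if b.length > 0 then b.getD 0 "" else "")) := by
  rw [List.length_cons, List.range_succ_eq_map, List.foldl_cons, List.foldl_map]
  apply PySem.List.foldl_congr_mem
  intro acc' k _
  cases b with
  | nil => simp
  | cons y b' => simp

lemma pv_loopA_eq (a : List String) : ∀ (b : List String) (acc : Int),
    (List.range a.length).foldl (fun dist k => pvStep dist (a.getD k "")
        (if b.length > k then b.getD k "" else "")) acc
  = (a.drop b.length).foldl (fun dist t => dist + pvNum t)
      ((a.zip b).foldl (fun dist t => pvStep dist t.1 t.2) acc) := by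
  induction a with
  | nil => intro b acc; simp
  | cons x a ih =>
    intro b acc
    rw [pv_loopA_shift]
    cases b with
    | nil =>
      have h := ih [] (pvStep acc x "")
      simp [pvStep] at h ⊢
      exact h
    | cons y b' => simpa using ih b' (pvStep acc x y)

-- per-pair contribution rewritten through the |a-b| = a+b-2*min identity
lemma pvStep_eq (d : Int) (x y : String) :
    pvStep d x y = d + pvNum x + (if y = "" then 0 else pvNum y)
      - (if y ≠ "" ∧ pvClash x y = false then 2 * min (pvNum x) (pvNum y) else 0) := by
  have hx := pvNum_nonneg x
  have hy := pvNum_nonneg y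
  unfold pvStep
  by_cases h1 : y = ""
  · simp [h1]
  · by_cases h2 : pvClash x y
    · simp [h1, h2, abs_of_nonneg (by omega : (0:Int) ≤ pvNum x + pvNum y)]; ring
    · rcases le_total (pvNum x) (pvNum y) with h | h
      · simp [h1, h2, abs_of_nonpos (by omega : pvNum x - pvNum y ≤ 0), min_eq_left h]; ring
      · simp [h1, h2, abs_of_nonneg (by omega : (0:Int) ≤ pvNum x - pvNum y), min_eq_right h]; ring

-- the zip-phase fold equals the global-sum formulation over the zipped pairs
lemma pv_zip_fold (l : List (String × String)) (acc : Int) :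
    l.foldl (fun dist t => pvStep dist t.1 t.2) acc
  = acc + (l.map (fun t => pvNum t.1)).sum
      + ((l.filter (fun t => t.2 ≠ "")).map (fun t => pvNum t.2)).sum
      - 2 * ((l.filter (fun t => t.2 ≠ "" ∧ pvClash t.1 t.2 = false)).map
          (fun t => min (pvNum t.1) (pvNum t.2))).sum := by
  induction l generalizing acc with
  | nil => simp
  | cons t l ih =>
    rw [List.foldl_cons, ih, pvStep_eq]
    by_cases h1 : t.2 = "" <;> by_cases h2 : pvClash t.1 t.2 = false <;>
      simp [h1, h2] <;> ring

-- Σ pvNum over the longer list splits into the zipped prefix and the dropped tail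
lemma pv_fst_sum (a : List String) : ∀ (b : List String), b.length ≤ a.length →
    (a.map pvNum).sum
      = ((a.zip b).map (fun t => pvNum t.1)).sum + ((a.drop b.length).map pvNum).sum := by
  induction a with
  | nil => intro b hb; simp
  | cons x t ih =>
    intro b hb
    cases b with
    | nil => simp
    | cons y u =>
      simp only [List.zip_cons_cons, List.map_cons, List.sum_cons, List.length_cons,
        List.drop_succ_cons]
      have := ih u (by simpa using hb)
      omega

-- Σ pvNum over the nonempty second components of the zip = Σ over the nonempty shorter entries
lemma pv_snd_filter (a : List String) : ∀ (b : List String), b.length ≤ a.length →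
    ((a.zip b).filter (fun t => t.2 ≠ "")).map (fun t => pvNum t.2)
      = (b.filter (fun t => t ≠ "")).map pvNum := by
  induction a with
  | nil => intro b hb; simp at hb; simp [hb]
  | cons x t ih =>
    intro b hb
    cases b with
    | nil => simp
    | cons y u =>
      have ihu := ih u (by simpa using hb)
      by_cases hy : y = "" <;> simp [List.zip_cons_cons, hy] <;> simpa using ihu

-- A, in the no-swap orientation, equals B's formula on (a, b)
lemma pv_custom_nswap (s1 s2 : List String) (h : ¬ s1.length < s2.length)
    (conceptSpace roleSpace : Int) :
    custom conceptSpace roleSpace s1 s2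
  = ((s1.map pvNum).sum + ((s2.filter (fun t => t ≠ "")).map pvNum).sum)
    - 2 * (((s1.zip s2).filter (fun t => t.2 ≠ "" ∧ pvClash t.1 t.2 = false)).map
        (fun t => min (pvNum t.1) (pvNum t.2))).sum := by
  rw [custom, if_neg h]
  refine (pv_loopA_eq s1 s2 0).trans ?_
  rw [pv_zip_fold, PySem.List.foldl_add]
  have hb : s2.length ≤ s1.length := by omega
  have hsplit := pv_fst_sum s1 s2 hb
  have hsnd := pv_snd_filter s1 s2 hb
  rw [hsnd]
  omega

lemma pv_custom_eq_alt (conceptSpace roleSpace : Int) (s1 s2 : List String) :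
    custom conceptSpace roleSpace s1 s2 = custom_alt conceptSpace roleSpace s1 s2 := by
  by_cases h : s1.length < s2.length
  · rw [custom, if_pos h]
    rw [pv_custom_nswap s2 s1 (by omega) conceptSpace roleSpace]
    simp [custom_alt, show ¬ s1.length ≥ s2.length by omega]
  · rw [pv_custom_nswap s1 s2 h conceptSpace roleSpace]
    simp [custom_alt, show s1.length ≥ s2.length by omega]

-- ===== VERDICT (by name: the statement is the Claim_ definition above) =====
theorem custom_spec : Claim_equal_custom := by
  intro conceptSpace roleSpace s1 s2 _ _
  exact pv_custom_eq_alt conceptSpace roleSpace s1 s2
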